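-- pv_equiv track=rewrite | github.com/JSONMartin/codingChallenges | CodeFights/arcade/Intro/level2-matrixElementsSum.py | matrixElementsSumHorizontalSolution
-- ===== SOURCE A (Python) =====
-- def matrixElementsSumHorizontalSolution(matrix):
--     height, width = len(matrix), len(matrix[0])
--     total = 0
--     rowsToSkip = {}
--
--     for row in range(height):
--         for col in range(width):
--             if matrix[row][col] == 0:
--                 rowsToSkip[col] = True
--             if col in rowsToSkip:
--                 continue
--
--             total += matrix[row][col]
--
--     return total
-- ===== SOURCE B (Python) =====
-- def matrixElementsSumHorizontalSolution(matrix):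
--     width = len(matrix[0])
--     total = 0
--     for col in range(width):
--         for row in matrix:
--             value = row[col]
--             if value == 0:
--                 break
--             total += value
--     return total
-- ===== Notes on version B (the rewrite author's own statement) =====
-- stated objective: simpler
-- what changed: Column-major traversal with an early break at the first zero of each column replaces row-major traversal with an auxiliary rowsToSkip dict that marks and then skips columns.
import Mathlib
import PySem

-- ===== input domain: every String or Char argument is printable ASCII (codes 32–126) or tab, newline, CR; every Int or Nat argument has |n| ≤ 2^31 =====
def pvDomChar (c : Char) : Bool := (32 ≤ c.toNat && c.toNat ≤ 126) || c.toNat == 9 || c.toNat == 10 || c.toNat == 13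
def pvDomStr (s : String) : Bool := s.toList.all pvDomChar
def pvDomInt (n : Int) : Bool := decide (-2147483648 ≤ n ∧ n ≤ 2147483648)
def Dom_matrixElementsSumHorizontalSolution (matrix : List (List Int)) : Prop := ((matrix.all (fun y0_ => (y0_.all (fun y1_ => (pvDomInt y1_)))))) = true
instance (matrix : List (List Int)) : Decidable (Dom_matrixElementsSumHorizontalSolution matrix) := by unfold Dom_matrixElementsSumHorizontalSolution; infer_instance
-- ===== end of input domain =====

-- B replaces A's row-major sweep with a rowsToSkip dict by a column-major sweep that breaks at the
-- first zero of each column (simpler: no auxiliary skip state). Equivalence is about return values.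

-- ===== PORT A =====
-- matrix[0] and matrix[row][col] raise IndexError in Python on empty/jagged input; the ports use
-- pyGetD defaults there and Pre_ excludes exactly those inputs.
def matrixElementsSumHorizontalSolution (matrix : List (List Int)) : Int :=
  let height : Int := matrix.length
  let width : Int := (PySem.List.pyGetD matrix 0 []).length
  let st :=
    (PySem.List.pyRange 0 height 1).foldl
      (fun (st : Int × PySem.Dict Int Bool) row =>
        (PySem.List.pyRange 0 width 1).foldl
          (fun (st : Int × PySem.Dict Int Bool) col =>
            let v := PySem.List.pyGetD (PySem.List.pyGetD matrix row []) col 0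
            let d := if v == 0 then st.2.insert col true else st.2
            if d.contains col then (st.1, d) else (st.1 + v, d))
          st)
      (0, PySem.Dict.empty)
  st.1

-- ===== PORT B =====
-- inner 'for row in matrix: … break' of Source B
def pvColLoop (col : Int) (rows : List (List Int)) (total : Int) : Int :=
  match rows with
  | [] => total
  | r :: rs =>
      let v := PySem.List.pyGetD r col 0
      if v == 0 then total else pvColLoop col rs (total + v)

def matrixElementsSumHorizontalSolution_alt (matrix : List (List Int)) : Int :=
  let width : Int := (PySem.List.pyGetD matrix 0 []).length
  (PySem.List.pyRange 0 width 1).foldl (fun total col => pvColLoop col matrix total) 0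

-- ===== PRECONDITION & SPEC =====
-- Pre_ excludes exactly the inputs where Python A raises IndexError: the empty matrix (matrix[0])
-- and jagged matrices with a row shorter than the first row (matrix[row][col]).
def Pre_matrixElementsSumHorizontalSolution (matrix : List (List Int)) : Prop :=
  matrix ≠ [] ∧ ∀ r ∈ matrix, (matrix.headD []).length ≤ r.length
instance (matrix : List (List Int)) : Decidable (Pre_matrixElementsSumHorizontalSolution matrix) := by
  unfold Pre_matrixElementsSumHorizontalSolution; infer_instance
def pvWitness_matrixElementsSumHorizontalSolution : List (List Int) := [[1, 2], [0, 3]]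
def Spec_matrixElementsSumHorizontalSolution (matrix : List (List Int)) (out : Int) : Prop := out = matrixElementsSumHorizontalSolution_alt matrix
instance (matrix : List (List Int)) (out : Int) : Decidable (Spec_matrixElementsSumHorizontalSolution matrix out) := by unfold Spec_matrixElementsSumHorizontalSolution; infer_instance

-- ===== CLAIM (what is proved, stated in full; the proofs are below) =====
def Claim_equal_matrixElementsSumHorizontalSolution : Prop := ∀ (matrix : List (List Int)), Dom_matrixElementsSumHorizontalSolution matrix → Pre_matrixElementsSumHorizontalSolution matrix → Spec_matrixElementsSumHorizontalSolution matrix (matrixElementsSumHorizontalSolution matrix)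

-- ===== LEMMAS AND PROOFS =====

-- sum of the entries of column `col` above its first zero (0-defaulted indexing)
def pvStw (col : Int) : List (List Int) → Int
  | [] => 0
  | r :: rs =>
      let v := PySem.List.pyGetD r col 0
      if v == 0 then 0 else v + pvStw col rs

-- finite sum over column indices 0..k-1
def pvSumC : Nat → (Nat → Int) → Int
  | 0, _ => 0
  | k + 1, f => pvSumC k f + f k

theorem pvSumC_congr (k : Nat) (f g : Nat → Int) (h : ∀ c < k, f c = g c) :
    pvSumC k f = pvSumC k g := by
  induction k with
  | zero => rfl
  | succ k ih =>
    simp only [pvSumC, ih (fun c hc => h c (Nat.lt_succ_of_lt hc)), h k (Nat.lt_succ_self k)]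

theorem pvSumC_add (k : Nat) (f g : Nat → Int) :
    pvSumC k (fun c => f c + g c) = pvSumC k f + pvSumC k g := by
  induction k with
  | zero => rfl
  | succ k ih => simp only [pvSumC, ih]; ring

theorem pvColLoop_eq (col : Int) (rows : List (List Int)) (t : Int) :
    pvColLoop col rows t = t + pvStw col rows := by
  induction rows generalizing t with
  | nil => simp [pvColLoop, pvStw]
  | cons r rs ih =>
    simp only [pvColLoop, pvStw]
    split_ifs with h
    · ring
    · rw [ih]; ring

theorem pvAlt_fold (matrix : List (List Int)) (k : Nat) (t : Int) :
    (PySem.List.pyRange 0 (k : Int) 1).foldl (fun total col => pvColLoop col matrix total) t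
      = t + pvSumC k (fun c => pvStw (c : Int) matrix) := by
  induction k generalizing t with
  | zero => rw [Nat.cast_zero, PySem.List.pyRange_one_eq_nil le_rfl]; simp [pvSumC]
  | succ k ih =>
    have hc : ((k + 1 : Nat) : Int) = (k : Int) + 1 := by push_cast; ring
    rw [hc, PySem.List.pyRange_one_succ_right (by positivity), List.foldl_append, ih]
    simp only [List.foldl_cons, List.foldl_nil, pvColLoop_eq, pvSumC]
    ring

-- dict state after the inner loop of A over columns 0..k-1 of row r, starting from d
def pvDAfter (r : List Int) (d : PySem.Dict Int Bool) : Nat → PySem.Dict Int Bool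
  | 0 => d
  | k + 1 =>
      let dk := pvDAfter r d k
      if PySem.List.pyGetD r (k : Int) 0 == 0 then dk.insert (k : Int) true else dk

theorem pvDAfter_contains (r : List Int) (d : PySem.Dict Int Bool) (k : Nat) (c : Int) :
    (pvDAfter r d k).contains c
      = (if 0 ≤ c ∧ c < (k : Int) ∧ PySem.List.pyGetD r c 0 = 0 then true else d.contains c) := by
  induction k with
  | zero =>
    rw [if_neg (by push_cast; omega)]
    rfl
  | succ k ih =>
    simp only [pvDAfter]
    by_cases hv : (PySem.List.pyGetD r (k : Int) 0 == 0) = true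
    · rw [if_pos hv, PySem.Dict.contains_insert, ih]
      have hz : PySem.List.pyGetD r (k : Int) 0 = 0 := by simpa using hv
      by_cases hck : c = (k : Int)
      · subst hck
        have hcond : 0 ≤ ((k : Nat) : Int) ∧ ((k : Nat) : Int) < ((k + 1 : Nat) : Int) ∧
            PySem.List.pyGetD r ((k : Nat) : Int) 0 = 0 :=
          ⟨Int.natCast_nonneg k, by push_cast; omega, hz⟩
        rw [if_pos hcond]
        simp
      · have hne : (c == (k : Int)) = false := by simpa using hck
        rw [hne]
        simp only [Bool.false_or]
        by_cases h1 : 0 ≤ c ∧ c < (k : Int) ∧ PySem.List.pyGetD r c 0 = 0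
        · have hcond : 0 ≤ c ∧ c < ((k + 1 : Nat) : Int) ∧ PySem.List.pyGetD r c 0 = 0 :=
            ⟨h1.1, by have := h1.2.1; push_cast at this ⊢; omega, h1.2.2⟩
          rw [if_pos h1, if_pos hcond]
        · rw [if_neg h1, if_neg]
          rintro ⟨ha, hb, hzz⟩
          push_cast at hb
          have hne' : c ≠ (k : Int) := hck
          exact h1 ⟨ha, by omega, hzz⟩
    · rw [if_neg hv, ih]
      have hv' : ¬ PySem.List.pyGetD r (k : Int) 0 = 0 := by simpa using hv
      by_cases h1 : 0 ≤ c ∧ c < (k : Int) ∧ PySem.List.pyGetD r c 0 = 0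
      · have hcond : 0 ≤ c ∧ c < ((k + 1 : Nat) : Int) ∧ PySem.List.pyGetD r c 0 = 0 :=
          ⟨h1.1, by have := h1.2.1; push_cast at this ⊢; omega, h1.2.2⟩
        rw [if_pos h1, if_pos hcond]
      · rw [if_neg h1, if_neg]
        rintro ⟨ha, hb, hzz⟩
        push_cast at hb
        have hck : c ≠ (k : Int) := fun h => hv' (h ▸ hzz)
        exact h1 ⟨ha, by omega, hzz⟩

-- contribution of one cell of row r given the dict state d at the start of the row
def pvGAdd (r : List Int) (d : PySem.Dict Int Bool) (c : Nat) : Int :=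
  if d.contains (c : Int) then 0
  else if PySem.List.pyGetD r (c : Int) 0 = 0 then 0 else PySem.List.pyGetD r (c : Int) 0

theorem pvInner_fold (r : List Int) (k : Nat) (t : Int) (d : PySem.Dict Int Bool) :
    (PySem.List.pyRange 0 (k : Int) 1).foldl
        (fun (st : Int × PySem.Dict Int Bool) col =>
          let v := PySem.List.pyGetD r col 0
          let d' := if v == 0 then st.2.insert col true else st.2
          if d'.contains col then (st.1, d') else (st.1 + v, d')) (t, d)
      = (t + pvSumC k (pvGAdd r d), pvDAfter r d k) := by
  induction k generalizing t with
  | zero => rw [Nat.cast_zero, PySem.List.pyRange_one_eq_nil le_rfl]; simp [pvSumC, pvDAfter]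
  | succ k ih =>
    have hc : ((k + 1 : Nat) : Int) = (k : Int) + 1 := by push_cast; ring
    rw [hc, PySem.List.pyRange_one_succ_right (by positivity), List.foldl_append, ih]
    simp only [List.foldl_cons, List.foldl_nil, pvSumC, pvDAfter]
    have hcont' : (pvDAfter r d k).contains (k : Int) = d.contains (k : Int) := by
      rw [pvDAfter_contains, if_neg (by omega)]
    by_cases hv : (PySem.List.pyGetD r (k : Int) 0 == 0) = true
    · simp only [hv, if_pos, PySem.Dict.contains_insert_self]
      have hg : pvGAdd r d k = 0 := by
        unfold pvGAdd
        split_ifs with h1 h2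
        · rfl
        · rfl
        · exact absurd (by simpa using hv) h2
      rw [hg, add_zero]
    · simp only [hv, Bool.false_eq_true, if_false, hcont']
      by_cases hd : d.contains (k : Int) = true
      · simp only [hd, if_true]
        have hg : pvGAdd r d k = 0 := by unfold pvGAdd; rw [if_pos hd]
        rw [hg, add_zero]
      · simp only [Bool.not_eq_true] at hd
        simp only [hd, Bool.false_eq_true, if_false]
        have hg : pvGAdd r d k = PySem.List.pyGetD r (k : Int) 0 := by
          unfold pvGAdd
          rw [if_neg (by simp [hd]), if_neg (by simpa using hv)]
        rw [hg, add_assoc]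

theorem pvOuter_fold (W : Nat) (rows : List (List Int)) (t : Int) (d : PySem.Dict Int Bool) :
    (rows.foldl
        (fun (st : Int × PySem.Dict Int Bool) r =>
          (PySem.List.pyRange 0 (W : Int) 1).foldl
            (fun (st : Int × PySem.Dict Int Bool) col =>
              let v := PySem.List.pyGetD r col 0
              let d' := if v == 0 then st.2.insert col true else st.2
              if d'.contains col then (st.1, d') else (st.1 + v, d')) st) (t, d)).1
      = t + pvSumC W (fun c => if d.contains (c : Int) then 0 else pvStw (c : Int) rows) := by
  induction rows generalizing t d with
  | nil =>
    simp only [List.foldl]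
    have : pvSumC W (fun c => if d.contains (c : Int) then 0 else pvStw (c : Int) []) = 0 := by
      rw [pvSumC_congr W _ (fun _ => 0) (by intro c _; simp [pvStw])]
      induction W with
      | zero => rfl
      | succ k ih => simp [pvSumC, ih]
    rw [this]; ring
  | cons r rs ih =>
    simp only [List.foldl, pvInner_fold, ih]
    rw [add_assoc, ← pvSumC_add]
    congr 1
    apply pvSumC_congr
    intro c hc
    have hcW : (c : Int) < (W : Int) := by exact_mod_cast hc
    have hc0 : (0 : Int) ≤ (c : Int) := Int.natCast_nonneg c
    rw [pvDAfter_contains]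
    unfold pvGAdd
    by_cases hd : d.contains (c : Int) = true
    · rw [if_pos hd, if_pos hd,
        if_pos (show (if 0 ≤ (c : Int) ∧ (c : Int) < (W : Int) ∧ PySem.List.pyGetD r (c : Int) 0 = 0
            then true else d.contains (c : Int)) = true by split_ifs <;> simp [hd])]
      ring
    · rw [if_neg hd, if_neg hd]
      by_cases hv : PySem.List.pyGetD r (c : Int) 0 = 0
      · have hcond : 0 ≤ (c : Int) ∧ (c : Int) < (W : Int) ∧ PySem.List.pyGetD r (c : Int) 0 = 0 :=
          ⟨hc0, hcW, hv⟩
        rw [if_pos hv, if_pos (show _ = true by rw [if_pos hcond])]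
        simp only [pvStw]
        rw [if_pos (by simpa using hv)]
        ring
      · have hd' : d.contains (c : Int) = false := by simpa using hd
        rw [if_neg hv,
          if_neg (show ¬ (if 0 ≤ (c : Int) ∧ (c : Int) < (W : Int) ∧ PySem.List.pyGetD r (c : Int) 0 = 0
              then true else d.contains (c : Int)) = true by
            rw [if_neg (fun h => hv h.2.2), hd']; simp)]
        simp only [pvStw]
        rw [if_neg (by simpa using hv)]

-- ===== VERDICT (by name: the statement is the Claim_ definition above) =====
theorem matrixElementsSumHorizontalSolution_spec : Claim_equal_matrixElementsSumHorizontalSolution := by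
  unfold Claim_equal_matrixElementsSumHorizontalSolution
  intro matrix _ _
  unfold Spec_matrixElementsSumHorizontalSolution
  unfold matrixElementsSumHorizontalSolution matrixElementsSumHorizontalSolution_alt
  simp only []
  rw [PySem.List.foldl_pyRange_zero_pyGetD' matrix []
      (fun (st : Int × PySem.Dict Int Bool) r =>
        (PySem.List.pyRange 0 ((PySem.List.pyGetD matrix 0 []).length : Int) 1).foldl
          (fun (st : Int × PySem.Dict Int Bool) col =>
            let v := PySem.List.pyGetD r col 0
            let d' := if v == 0 then st.2.insert col true else st.2
            if d'.contains col then (st.1, d') else (st.1 + v, d')) st)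
      (0, PySem.Dict.empty)]
  rw [pvOuter_fold, pvAlt_fold]
  have h := pvSumC_congr (PySem.List.pyGetD matrix 0 []).length
    (fun c => if (PySem.Dict.empty : PySem.Dict Int Bool).contains (c : Int) = true then 0
              else pvStw (c : Int) matrix)
    (fun c => pvStw (c : Int) matrix)
    (fun c _ => by
      simp only [show (PySem.Dict.empty : PySem.Dict Int Bool).contains (c : Int) = false from rfl,
        Bool.false_eq_true, if_false])
  rw [h]
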